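-- pv_equiv track=rewrite | github.com/imnotamember/EEG_Analysis | recoding_events_opensesame_to_egi.py | empty_header_labeler
-- ===== SOURCE A (Python) =====
-- def empty_header_labeler(header):
--     meta_mapper = {0: 'meta_label_{0}', 1: 'meta_data_{0}'}
--     new_pair_index = 0
--     for index, label in enumerate(header):
--         if label is None:
--             header[index] = meta_mapper[new_pair_index % 2].format(int(new_pair_index / 2))
--             new_pair_index += 1
--     return header
-- ===== SOURCE B (Python) =====
-- def empty_header_labeler(header):
--     count = sum(1 for x in header if x is None)
--     labels = []
--     for i in range((count + 1) // 2):
--         labels.append('meta_label_{0}'.format(i))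
--         labels.append('meta_data_{0}'.format(i))
--     it = iter(labels)
--     header[:] = [next(it) if x is None else x for x in header]
--     return header
-- ===== Notes on version B (the rewrite author's own statement) =====
-- stated objective: alternative
-- what changed: B counts the Nones, pre-generates the whole label stream in label/data pairs up front, then fills the None slots from that stream with an iterator, replacing A's single scan with a running counter and parity/halving arithmetic per hit.
import Mathlib
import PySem

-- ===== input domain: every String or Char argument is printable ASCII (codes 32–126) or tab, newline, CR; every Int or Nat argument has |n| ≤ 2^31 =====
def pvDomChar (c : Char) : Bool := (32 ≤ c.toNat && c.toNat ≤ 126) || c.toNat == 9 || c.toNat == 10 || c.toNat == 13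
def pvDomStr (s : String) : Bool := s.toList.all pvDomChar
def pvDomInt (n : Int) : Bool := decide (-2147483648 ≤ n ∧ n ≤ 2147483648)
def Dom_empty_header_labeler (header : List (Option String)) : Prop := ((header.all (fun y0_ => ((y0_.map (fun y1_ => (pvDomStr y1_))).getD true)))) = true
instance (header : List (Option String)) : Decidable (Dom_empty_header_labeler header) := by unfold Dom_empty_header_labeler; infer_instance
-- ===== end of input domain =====

-- B counts the Nones, generates the full label stream in label/data PAIRS up front, and fills
-- the Nones from that stream — no running counter or parity arithmetic during the fill; both
-- Pythons mutate `header` in place and return the same object, so the equivalence proved here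
-- is about the returned value (which both versions build identically).

-- ===== PORT A =====
-- A writes only at the index currently being enumerated, so enumerating the ORIGINAL list
-- yields the same (index, label) pairs as Python's live enumerate; state = (list, counter).
-- meta_mapper[k % 2] cannot raise: k % 2 ∈ {0,1}, so the .getD "" default is unreachable.
-- int(k/2) on the nonnegative counter equals floor division — exact here.
def empty_header_labeler (header : List (Option String)) : List (Option String) :=
  let meta_mapper : PySem.Dict Int String := PySem.Dict.ofList [(0, "meta_label_{0}"), (1, "meta_data_{0}")]
  ((PySem.List.enumerate header 0).foldl
    (fun (st : List (Option String) × Int) p =>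
      match p.2 with
      | none =>
          (PySem.List.pySetD st.1 p.1
            (some (PySem.Str.replace ((PySem.Dict.get? meta_mapper (PySem.Int.mod st.2 2)).getD "")
              "{0}" (PySem.Int.toStr (PySem.Int.floordiv st.2 2)))),
           st.2 + 1)
      | some _ => st)
    (header, 0)).1

-- ===== PORT B =====
-- the list comprehension '[next(it) if x is None else x for x in header]': the iterator over
-- `labels` is the tail of the label list threaded through the recursion; the [] branch for a
-- None with an exhausted iterator is unreachable (labels always cover every None, proved below),
-- ported as leaving the entry unchanged.
def pvFillB : List (Option String) → List String → List (Option String)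
  | [], _ => []
  | some s :: t, ls => some s :: pvFillB t ls
  | none :: t, l :: ls => some l :: pvFillB t ls
  | none :: t, [] => none :: pvFillB t []

-- '.format(i)' on the single-placeholder templates = replace "{0}" with str(i).
def empty_header_labeler_alt (header : List (Option String)) : List (Option String) :=
  let count : Int := header.foldl (fun acc x => if x = none then acc + 1 else acc) 0
  let labels : List String :=
    (PySem.List.pyRange 0 (PySem.Int.floordiv (count + 1) 2) 1).foldl
      (fun acc i =>
        acc ++ [PySem.Str.replace "meta_label_{0}" "{0}" (PySem.Int.toStr i),
                PySem.Str.replace "meta_data_{0}" "{0}" (PySem.Int.toStr i)]) []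
  pvFillB header labels

-- ===== PRECONDITION & SPEC =====
def Spec_empty_header_labeler (header : List (Option String)) (out : List (Option String)) : Prop := out = empty_header_labeler_alt header
instance (header : List (Option String)) (out : List (Option String)) : Decidable (Spec_empty_header_labeler header out) := by unfold Spec_empty_header_labeler; infer_instance

-- ===== CLAIM (what is proved, stated in full; the proofs are below) =====
def Claim_equal_empty_header_labeler : Prop := ∀ (header : List (Option String)), Dom_empty_header_labeler header → Spec_empty_header_labeler header (empty_header_labeler header)

-- ===== LEMMAS AND PROOFS =====

-- the label A gives the k-th None entry (k ≥ 0)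
def pvFmt (k : Int) : String :=
  PySem.Str.replace (if PySem.Int.mod k 2 = 0 then "meta_label_{0}" else "meta_data_{0}")
    "{0}" (PySem.Int.toStr (PySem.Int.floordiv k 2))

-- reference recursion: relabel the None entries left to right, counter k
def pvGo : List (Option String) → Int → List (Option String)
  | [], _ => []
  | none :: t, k => some (pvFmt k) :: pvGo t (k + 1)
  | some s :: t, k => some s :: pvGo t k

-- the label stream: pvFmt k, pvFmt (k+1), …, m labels
def pvSeq : Int → Nat → List String
  | _, 0 => []
  | k, m + 1 => pvFmt k :: pvSeq (k + 1) m

def pvNones (xs : List (Option String)) : Nat := xs.countP (· = none)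

lemma pvSet_middle (ys t : List (Option String)) (x v : Option String) :
    (ys ++ x :: t).set ys.length v = ys ++ v :: t := by
  induction ys with
  | nil => rfl
  | cons a ys ih => simp [ih]

lemma pvMod2 (k : Int) (_hk : 0 ≤ k) :
    PySem.Int.mod k 2 = 0 ∨ PySem.Int.mod k 2 = 1 := by
  rw [PySem.Int.mod_eq_emod_of_pos (by omega)]
  omega

lemma pvDictEq (k : Int) (hk : 0 ≤ k) :
    (PySem.Dict.get? (PySem.Dict.ofList [((0:Int), "meta_label_{0}"), (1, "meta_data_{0}")])
      (PySem.Int.mod k 2)).getD ""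
    = (if PySem.Int.mod k 2 = 0 then "meta_label_{0}" else "meta_data_{0}") := by
  rcases pvMod2 k hk with h | h <;> rw [h] <;> rfl

lemma pvA_loop (xs : List (Option String)) (ys : List (Option String)) (k : Int) (hk : 0 ≤ k) :
    ((PySem.List.enumerate xs (ys.length : Int)).foldl
      (fun (st : List (Option String) × Int) p =>
        match p.2 with
        | none =>
            (PySem.List.pySetD st.1 p.1
              (some (PySem.Str.replace
                ((PySem.Dict.get? (PySem.Dict.ofList [((0:Int), "meta_label_{0}"), (1, "meta_data_{0}")])
                  (PySem.Int.mod st.2 2)).getD "")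
                "{0}" (PySem.Int.toStr (PySem.Int.floordiv st.2 2)))),
             st.2 + 1)
        | some _ => st)
      (ys ++ xs, k)).1 = ys ++ pvGo xs k := by
  induction xs generalizing ys k with
  | nil => simp [pvGo]
  | cons x t ih =>
    cases x with
    | none =>
      rw [PySem.List.enumerate_cons]
      simp only [List.foldl_cons]
      have hset : PySem.List.pySetD (ys ++ none :: t) ((ys.length : Int)) (some (pvFmt k))
          = ys ++ some (pvFmt k) :: t := by
        rw [PySem.List.pySetD_natCast]
        exact pvSet_middle ys t none (some (pvFmt k))
      rw [show (PySem.Str.replace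
            ((PySem.Dict.get? (PySem.Dict.ofList [((0:Int), "meta_label_{0}"), (1, "meta_data_{0}")])
              (PySem.Int.mod k 2)).getD "")
            "{0}" (PySem.Int.toStr (PySem.Int.floordiv k 2))) = pvFmt k from by
        rw [pvDictEq k hk]; rfl]
      rw [hset]
      have := ih (ys ++ [some (pvFmt k)]) (k + 1) (by omega)
      simpa [pvGo, List.append_assoc] using this
    | some s =>
      rw [PySem.List.enumerate_cons]
      simp only [List.foldl_cons]
      have := ih (ys ++ [some s]) k hk
      simpa [pvGo, List.append_assoc] using this

-- B's count loop counts the Nones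
lemma pvCount_loop (xs : List (Option String)) (a : Int) :
    xs.foldl (fun acc x => if x = none then acc + 1 else acc) a = a + (pvNones xs : Int) := by
  induction xs generalizing a with
  | nil => simp [pvNones]
  | cons x t ih =>
    cases x <;> simp [pvNones, ih] <;> push_cast <;> ring

-- append one more label to the stream
lemma pvSeq_snoc (k : Int) (m : Nat) :
    pvSeq k (m + 1) = pvSeq k m ++ [pvFmt (k + m)] := by
  induction m generalizing k with
  | zero => simp [pvSeq]
  | succ m ih =>
    rw [pvSeq, ih (k + 1), pvSeq]
    simp; ring_nf

-- the two labels for pair i are the stream entries 2i and 2i+1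
lemma pvFmt_even (n : Nat) :
    pvFmt ((2 * n : Nat) : Int)
      = PySem.Str.replace "meta_label_{0}" "{0}" (PySem.Int.toStr (n : Int)) := by
  unfold pvFmt
  have h1 : PySem.Int.mod ((2 * n : Nat) : Int) 2 = 0 := by
    rw [PySem.Int.mod_eq_emod_of_pos (by omega)]; omega
  have h2 : PySem.Int.floordiv ((2 * n : Nat) : Int) 2 = (n : Int) := by
    rw [PySem.Int.floordiv_eq_ediv_of_pos (by omega)]; omega
  rw [h1, h2]; simp

lemma pvFmt_odd' (n : Nat) :
    pvFmt (((2 * n : Nat) : Int) + 1)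
      = PySem.Str.replace "meta_data_{0}" "{0}" (PySem.Int.toStr (n : Int)) := by
  unfold pvFmt
  have h1 : PySem.Int.mod (((2 * n : Nat) : Int) + 1) 2 = 1 := by
    rw [PySem.Int.mod_eq_emod_of_pos (by omega)]; omega
  have h2 : PySem.Int.floordiv (((2 * n : Nat) : Int) + 1) 2 = (n : Int) := by
    rw [PySem.Int.floordiv_eq_ediv_of_pos (by omega)]; omega
  rw [h1, h2]; simp

-- B's pair-building loop produces exactly the stream pvFmt 0, …, pvFmt (2p-1)
lemma pvLabels_loop (p : Nat) (acc : List String) :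
    (PySem.List.pyRange 0 (p : Int) 1).foldl
      (fun acc i =>
        acc ++ [PySem.Str.replace "meta_label_{0}" "{0}" (PySem.Int.toStr i),
                PySem.Str.replace "meta_data_{0}" "{0}" (PySem.Int.toStr i)]) acc
      = acc ++ pvSeq 0 (2 * p) := by
  induction p generalizing acc with
  | zero => simp [PySem.List.pyRange_one_eq_nil, pvSeq]
  | succ p ih =>
    rw [show ((p + 1 : Nat) : Int) = (p : Int) + 1 by push_cast; ring,
        PySem.List.pyRange_one_succ_right (by omega)]
    rw [List.foldl_append]
    rw [ih acc]
    simp only [List.foldl_cons, List.foldl_nil]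
    have h21 : 2 * (p + 1) = (2 * p + 1) + 1 := by ring
    rw [h21, pvSeq_snoc, pvSeq_snoc]
    have e1 : pvFmt (0 + ((2 * p : Nat) : Int)) = PySem.Str.replace "meta_label_{0}" "{0}" (PySem.Int.toStr (p : Int)) := by
      rw [show ((0:Int) + ((2 * p : Nat) : Int)) = ((2 * p : Nat) : Int) by ring, pvFmt_even]
    have e2 : pvFmt (0 + ((2 * p + 1 : Nat) : Int)) = PySem.Str.replace "meta_data_{0}" "{0}" (PySem.Int.toStr (p : Int)) := by
      rw [show ((0:Int) + ((2 * p + 1 : Nat) : Int)) = ((2 * p : Nat) : Int) + 1 by push_cast; ring, pvFmt_odd']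
    rw [e1, e2]
    simp

-- filling from a long-enough stream starting at k is pvGo
lemma pvFill_seq (xs : List (Option String)) (k : Int) (m : Nat) (hm : pvNones xs ≤ m) :
    pvFillB xs (pvSeq k m) = pvGo xs k := by
  induction xs generalizing k m with
  | nil => simp [pvFillB, pvGo]
  | cons x t ih =>
    cases x with
    | none =>
      have : 1 + pvNones t ≤ m := by
        simpa [pvNones, List.countP_cons, Nat.add_comm] using hm
      obtain ⟨m', rfl⟩ : ∃ m', m = m' + 1 := ⟨m - 1, by omega⟩
      rw [pvSeq]
      simp only [pvFillB, pvGo]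
      rw [ih (k + 1) m' (by omega)]
    | some s =>
      have hm' : pvNones t ≤ m := by
        simpa [pvNones, List.countP_cons] using hm
      simp only [pvFillB, pvGo]
      rw [ih k m hm']

-- ===== VERDICT (by name: the statement is the Claim_ definition above) =====
theorem empty_header_labeler_spec : Claim_equal_empty_header_labeler := by
  intro header _
  unfold Spec_empty_header_labeler empty_header_labeler empty_header_labeler_alt
  have hA := pvA_loop header [] 0 le_rfl
  simp only [List.length_nil, Nat.cast_zero, List.nil_append] at hA
  rw [hA]
  show pvGo header 0 = pvFillB header
    ((PySem.List.pyRange 0 (PySem.Int.floordiv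
        ((header.foldl (fun acc x => if x = none then acc + 1 else acc) 0) + 1) 2) 1).foldl
      (fun acc i =>
        acc ++ [PySem.Str.replace "meta_label_{0}" "{0}" (PySem.Int.toStr i),
                PySem.Str.replace "meta_data_{0}" "{0}" (PySem.Int.toStr i)]) [])
  rw [pvCount_loop header 0]
  have hp : PySem.Int.floordiv (0 + (pvNones header : Int) + 1) 2
      = (((pvNones header + 1) / 2 : Nat) : Int) := by
    rw [PySem.Int.floordiv_eq_ediv_of_pos (by omega)]
    omega
  rw [hp, pvLabels_loop ((pvNones header + 1) / 2) []]
  rw [List.nil_append]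
  rw [pvFill_seq header 0 (2 * ((pvNones header + 1) / 2)) (by omega)]
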